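-- pv_equiv track=rewrite | github.com/guitargnarr/guitar-model-lab | validate_tab.py | nearest_valid_fret
-- ===== SOURCE A (Python) =====
-- E_PHRYGIAN_FRETS = {
--     'E': {0, 1, 3, 5, 7, 8, 10, 12, 13, 15, 17, 19, 20, 22},  # low E
--     'A': {0, 2, 3, 5, 7, 8, 10, 12, 14, 15, 17, 19, 20, 22},
--     'D': {0, 2, 3, 5, 7, 9, 10, 12, 14, 15, 17, 19, 21, 22},
--     'G': {0, 2, 4, 5, 7, 9, 10, 12, 14, 16, 17, 19, 21, 22},
--     'B': {0, 1, 3, 5, 6, 8, 10, 12, 13, 15, 17, 18, 20, 22},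
--     'e': {0, 1, 3, 5, 7, 8, 10, 12, 13, 15, 17, 19, 20, 22},  # high e
-- }
--
-- def nearest_valid_fret(string_name: str, fret: int) -> int:
--     """Find nearest valid E Phrygian fret for a given invalid fret."""
--     key = 'E' if string_name.upper() == 'E' else string_name
--     if key not in E_PHRYGIAN_FRETS:
--         key = 'e' if string_name.lower() == 'e' else string_name
--
--     valid_set = E_PHRYGIAN_FRETS.get(key, E_PHRYGIAN_FRETS['e'])
--
--     if fret in valid_set:
--         return fret
--
--     # Find nearest valid fret
--     below = [f for f in valid_set if f < fret]
--     above = [f for f in valid_set if f > fret]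
--
--     nearest_below = max(below) if below else None
--     nearest_above = min(above) if above else None
--
--     if nearest_below is None:
--         return nearest_above
--     if nearest_above is None:
--         return nearest_below
--
--     # Return closer one (prefer lower if tie)
--     if fret - nearest_below <= nearest_above - fret:
--         return nearest_below
--     return nearest_above
-- ===== SOURCE B (Python) =====
-- # Binary search over pre-sorted fret tables instead of partition/max/min over sets.
-- _E_SORTED = (0, 1, 3, 5, 7, 8, 10, 12, 13, 15, 17, 19, 20, 22)
--
-- _SORTED_FRETS = {
--     'A': (0, 2, 3, 5, 7, 8, 10, 12, 14, 15, 17, 19, 20, 22),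
--     'D': (0, 2, 3, 5, 7, 9, 10, 12, 14, 15, 17, 19, 21, 22),
--     'G': (0, 2, 4, 5, 7, 9, 10, 12, 14, 16, 17, 19, 21, 22),
--     'B': (0, 1, 3, 5, 6, 8, 10, 12, 13, 15, 17, 18, 20, 22),
-- }
--
-- def nearest_valid_fret(string_name: str, fret: int) -> int:
--     """Find nearest valid E Phrygian fret for a given invalid fret."""
--     frets = _SORTED_FRETS.get(string_name, _E_SORTED)
--     if fret <= frets[0]:
--         return frets[0]
--     if fret >= frets[-1]:
--         return frets[-1]
--     # first index with frets[i] >= fret (hand-written bisect_left)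
--     lo, hi = 0, len(frets)
--     while lo < hi:
--         mid = (lo + hi) // 2
--         if frets[mid] < fret:
--             lo = mid + 1
--         else:
--             hi = mid
--     above = frets[lo]
--     if above == fret:
--         return fret
--     below = frets[lo - 1]
--     return below if fret - below <= above - fret else above
-- ===== Notes on version B (the rewrite author's own statement) =====
-- stated objective: alternative
-- what changed: Replaces the partition-into-below/above comprehensions with max/min over the fret set by a hand-written bisect_left binary search over pre-sorted fret tables, comparing the two neighbouring entries (ties to the lower fret).
import Mathlib
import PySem

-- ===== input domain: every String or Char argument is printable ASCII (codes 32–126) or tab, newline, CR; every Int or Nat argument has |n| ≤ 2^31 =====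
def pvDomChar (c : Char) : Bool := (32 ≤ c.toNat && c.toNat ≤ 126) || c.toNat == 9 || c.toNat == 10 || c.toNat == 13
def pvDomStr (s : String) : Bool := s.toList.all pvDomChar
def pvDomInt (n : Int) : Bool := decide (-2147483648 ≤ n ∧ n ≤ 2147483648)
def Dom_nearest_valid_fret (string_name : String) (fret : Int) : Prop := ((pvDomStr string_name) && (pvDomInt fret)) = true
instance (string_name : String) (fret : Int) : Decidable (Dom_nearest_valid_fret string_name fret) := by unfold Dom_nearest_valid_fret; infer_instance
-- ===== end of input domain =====

-- B replaces A's partition/max/min over the fret set by a hand-written binary search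
-- over a pre-sorted fret table (objective: simpler/alternative decomposition).

-- ===== PORT A =====
def E_PHRYGIAN_FRETS : PySem.Dict String (PySem.Set Int) :=
  PySem.Dict.ofList [
    ("E", PySem.Set.ofList [0, 1, 3, 5, 7, 8, 10, 12, 13, 15, 17, 19, 20, 22]),
    ("A", PySem.Set.ofList [0, 2, 3, 5, 7, 8, 10, 12, 14, 15, 17, 19, 20, 22]),
    ("D", PySem.Set.ofList [0, 2, 3, 5, 7, 9, 10, 12, 14, 15, 17, 19, 21, 22]),
    ("G", PySem.Set.ofList [0, 2, 4, 5, 7, 9, 10, 12, 14, 16, 17, 19, 21, 22]),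
    ("B", PySem.Set.ofList [0, 1, 3, 5, 6, 8, 10, 12, 13, 15, 17, 18, 20, 22]),
    ("e", PySem.Set.ofList [0, 1, 3, 5, 7, 8, 10, 12, 13, 15, 17, 19, 20, 22])]

def nearest_valid_fret (string_name : String) (fret : Int) : Int :=
  let key := if PySem.Str.upper string_name == "E" then "E" else string_name
  let key := if !(E_PHRYGIAN_FRETS.contains key) then
               (if PySem.Str.lower string_name == "e" then "e" else string_name)
             else key
  -- E_PHRYGIAN_FRETS['e'] is a lookup of a literal key of the literal dict; it cannot fail
  let valid_set := E_PHRYGIAN_FRETS.getD key ((E_PHRYGIAN_FRETS.get? "e").getD PySem.Set.empty)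
  if PySem.Set.contains valid_set fret then fret
  else
    let below := valid_set.filter (fun f => decide (f < fret))
    let above := valid_set.filter (fun f => decide (fret < f))
    let nearest_below := PySem.List.max? below (fun x => x)
    let nearest_above := PySem.List.min? above (fun x => x)
    match nearest_below, nearest_above with
    | none, na => na.getD 0   -- Python 'return nearest_above'; both None is unreachable (the literal sets are nonempty)
    | some b, none => b
    | some b, some a => if fret - b ≤ a - fret then b else a

-- ===== PORT B =====
def alt_E_SORTED : List Int := [0, 1, 3, 5, 7, 8, 10, 12, 13, 15, 17, 19, 20, 22]

def alt_SORTED_FRETS : PySem.Dict String (List Int) :=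
  PySem.Dict.ofList [
    ("A", [0, 2, 3, 5, 7, 8, 10, 12, 14, 15, 17, 19, 20, 22]),
    ("D", [0, 2, 3, 5, 7, 9, 10, 12, 14, 15, 17, 19, 21, 22]),
    ("G", [0, 2, 4, 5, 7, 9, 10, 12, 14, 16, 17, 19, 21, 22]),
    ("B", [0, 1, 3, 5, 6, 8, 10, 12, 13, 15, 17, 18, 20, 22])]

-- the hand-written bisect_left while-loop of Source B, transliterated with fuel
-- (each iteration shrinks hi - lo by at least one, so fuel hi - lo is exact)
def altBisectGo (frets : List Int) (fret : Int) : Nat → Nat → Nat → Nat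
  | 0, lo, _ => lo
  | fuel + 1, lo, hi =>
    if lo < hi then
      let mid := (lo + hi) / 2
      if PySem.List.pyGetD frets (mid : Int) 0 < fret then altBisectGo frets fret fuel (mid + 1) hi
      else altBisectGo frets fret fuel lo mid
    else lo

def altBisect (frets : List Int) (fret : Int) (lo hi : Nat) : Nat :=
  altBisectGo frets fret (hi - lo) lo hi

def nearest_valid_fret_alt (string_name : String) (fret : Int) : Int :=
  let frets := alt_SORTED_FRETS.getD string_name alt_E_SORTED
  if fret ≤ PySem.List.pyGetD frets 0 0 then PySem.List.pyGetD frets 0 0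
  else if PySem.List.pyGetD frets (-1) 0 ≤ fret then PySem.List.pyGetD frets (-1) 0
  else
    let lo := altBisect frets fret 0 frets.length
    let above := PySem.List.pyGetD frets (lo : Int) 0
    if above == fret then fret
    else
      let below := PySem.List.pyGetD frets ((lo : Int) - 1) 0
      if fret - below ≤ above - fret then below else above

-- ===== PRECONDITION & SPEC =====
def Spec_nearest_valid_fret (string_name : String) (fret : Int) (out : Int) : Prop := out = nearest_valid_fret_alt string_name fret
instance (string_name : String) (fret : Int) (out : Int) : Decidable (Spec_nearest_valid_fret string_name fret out) := by unfold Spec_nearest_valid_fret; infer_instance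

-- ===== CLAIM (what is proved, stated in full; the proofs are below) =====
def Claim_equal_nearest_valid_fret : Prop := ∀ (string_name : String) (fret : Int), Dom_nearest_valid_fret string_name fret → Spec_nearest_valid_fret string_name fret (nearest_valid_fret string_name fret)

-- ===== LEMMAS AND PROOFS =====

-- A's key-resolution prelude (the lets before the core computation)
def resolveA (string_name : String) : PySem.Set Int :=
  let key := if PySem.Str.upper string_name == "E" then "E" else string_name
  let key := if !(E_PHRYGIAN_FRETS.contains key) then
               (if PySem.Str.lower string_name == "e" then "e" else string_name)
             else key
  E_PHRYGIAN_FRETS.getD key ((E_PHRYGIAN_FRETS.get? "e").getD PySem.Set.empty)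

def resolveB (string_name : String) : List Int :=
  alt_SORTED_FRETS.getD string_name alt_E_SORTED

-- A's core after the key has been resolved to a fret set (as its underlying list)
def coreA (valid_set : PySem.Set Int) (fret : Int) : Int :=
  if PySem.Set.contains valid_set fret then fret
  else
    let below := valid_set.filter (fun f => decide (f < fret))
    let above := valid_set.filter (fun f => decide (fret < f))
    let nearest_below := PySem.List.max? below (fun x => x)
    let nearest_above := PySem.List.min? above (fun x => x)
    match nearest_below, nearest_above with
    | none, na => na.getD 0
    | some b, none => b
    | some b, some a => if fret - b ≤ a - fret then b else a

-- B's core after the table row has been selected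
def coreB (frets : List Int) (fret : Int) : Int :=
  if fret ≤ PySem.List.pyGetD frets 0 0 then PySem.List.pyGetD frets 0 0
  else if PySem.List.pyGetD frets (-1) 0 ≤ fret then PySem.List.pyGetD frets (-1) 0
  else
    let lo := altBisect frets fret 0 frets.length
    let above := PySem.List.pyGetD frets (lo : Int) 0
    if above == fret then fret
    else
      let below := PySem.List.pyGetD frets ((lo : Int) - 1) 0
      if fret - below ≤ above - fret then below else above

lemma A_eq_core (s : String) (fret : Int) :
    nearest_valid_fret s fret = coreA (resolveA s) fret := by
  unfold nearest_valid_fret coreA resolveA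
  rfl

lemma B_eq_core (s : String) (fret : Int) :
    nearest_valid_fret_alt s fret = coreB (resolveB s) fret := by
  unfold nearest_valid_fret_alt coreB resolveB
  rfl

lemma coreB_low (L : List Int) (fret : Int) (h : fret ≤ PySem.List.pyGetD L 0 0) :
    coreB L fret = PySem.List.pyGetD L 0 0 := by
  unfold coreB; rw [if_pos h]

lemma coreB_high (L : List Int) (fret : Int) (h1 : ¬ fret ≤ PySem.List.pyGetD L 0 0)
    (h2 : PySem.List.pyGetD L (-1) 0 ≤ fret) :
    coreB L fret = PySem.List.pyGetD L (-1) 0 := by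
  unfold coreB; rw [if_neg h1, if_pos h2]

lemma coreA_low (L : PySem.Set Int) (fret : Int) (hneg : fret < 0)
    (hall : ∀ a ∈ L, 0 ≤ a) (hmin : PySem.List.min? L (fun x => x) = some 0) :
    coreA L fret = 0 := by
  have hc : PySem.Set.contains L fret = false := by
    rw [Bool.eq_false_iff]
    intro h
    have := hall fret ((PySem.Set.contains_iff _ _).mp h)
    omega
  have hb : L.filter (fun f => decide (f < fret)) = [] := by
    rw [List.filter_eq_nil_iff]
    intro a ha
    have := hall a ha
    simp only [decide_eq_true_eq]
    omega
  have ha' : L.filter (fun f => decide (fret < f)) = L := by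
    rw [List.filter_eq_self]
    intro a ha
    have := hall a ha
    simp only [decide_eq_true_eq]
    omega
  simp [coreA, hb, ha', hmin, PySem.List.max?]
  intro h
  have := hall fret h
  omega

lemma coreA_high (L : PySem.Set Int) (fret : Int) (hbig : 22 < fret)
    (hall : ∀ a ∈ L, a ≤ 22) (hmax : PySem.List.max? L (fun x => x) = some 22) :
    coreA L fret = 22 := by
  have hc : PySem.Set.contains L fret = false := by
    rw [Bool.eq_false_iff]
    intro h
    have := hall fret ((PySem.Set.contains_iff _ _).mp h)
    omega
  have hb : L.filter (fun f => decide (f < fret)) = L := by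
    rw [List.filter_eq_self]
    intro a ha
    have := hall a ha
    simp only [decide_eq_true_eq]
    omega
  have ha' : L.filter (fun f => decide (fret < f)) = [] := by
    rw [List.filter_eq_nil_iff]
    intro a ha
    have := hall a ha
    simp only [decide_eq_true_eq]
    omega
  simp [coreA, hb, ha', hmax, PySem.List.min?]
  intro h
  have := hall fret h
  omega

lemma core_eq_of (L : List Int)
    (hL : L = [0, 1, 3, 5, 7, 8, 10, 12, 13, 15, 17, 19, 20, 22] ∨
          L = [0, 2, 3, 5, 7, 8, 10, 12, 14, 15, 17, 19, 20, 22] ∨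
          L = [0, 2, 3, 5, 7, 9, 10, 12, 14, 15, 17, 19, 21, 22] ∨
          L = [0, 2, 4, 5, 7, 9, 10, 12, 14, 16, 17, 19, 21, 22] ∨
          L = [0, 1, 3, 5, 6, 8, 10, 12, 13, 15, 17, 18, 20, 22]) (fret : Int) :
    coreA L fret = coreB L fret := by
  have h0 : PySem.List.pyGetD L 0 0 = 0 := by
    rcases hL with h | h | h | h | h <;> subst h <;> decide
  have h22 : PySem.List.pyGetD L (-1) 0 = 22 := by
    rcases hL with h | h | h | h | h <;> subst h <;> decide
  by_cases h1 : fret < 0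
  · rw [coreB_low L fret (by omega), h0]
    refine coreA_low L fret h1 ?_ ?_ <;>
      rcases hL with h | h | h | h | h <;> subst h <;> decide
  · by_cases h2 : 22 < fret
    · rw [coreB_high L fret (by omega) (by omega), h22]
      refine coreA_high L fret h2 ?_ ?_ <;>
        rcases hL with h | h | h | h | h <;> subst h <;> decide
    · rcases hL with h | h | h | h | h <;> subst h <;>
        (interval_cases fret <;> decide)

lemma resolveB_default (s : String) (hA : s ≠ "A") (hD : s ≠ "D") (hG : s ≠ "G")
    (hB : s ≠ "B") : resolveB s = alt_E_SORTED := by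
  unfold resolveB
  apply PySem.Dict.getD_of_not_contains
  rw [PySem.Dict.contains_eq_decide_mem_keys,
      show alt_SORTED_FRETS.keys = ["A", "D", "G", "B"] from by decide]
  simp [hA, hD, hG, hB]

lemma resolveA_default (s : String) (hE : s ≠ "E") (hA : s ≠ "A") (hD : s ≠ "D")
    (hG : s ≠ "G") (hB : s ≠ "B") (he : s ≠ "e") :
    resolveA s = [0, 1, 3, 5, 7, 8, 10, 12, 13, 15, 17, 19, 20, 22] := by
  unfold resolveA
  cases hu : (PySem.Str.upper s == "E") with
  | false =>
    have hc : E_PHRYGIAN_FRETS.contains s = false := by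
      rw [PySem.Dict.contains_eq_decide_mem_keys,
          show E_PHRYGIAN_FRETS.keys = ["E", "A", "D", "G", "B", "e"] from by decide]
      simp [hE, hA, hD, hG, hB, he]
    simp only [Bool.false_eq_true, if_false, hc, Bool.not_false, if_true]
    cases hl : (PySem.Str.lower s == "e") with
    | false =>
      simp only [Bool.false_eq_true, if_false]
      rw [PySem.Dict.getD_of_not_contains _ _ hc]
      decide
    | true =>
      simp only [if_true]
      decide
  | true =>
    simp only [if_true,
      show E_PHRYGIAN_FRETS.contains "E" = true from by decide, Bool.not_true,
      Bool.false_eq_true, if_false]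
    decide

-- ===== VERDICT (by name: the statement is the Claim_ definition above) =====
theorem nearest_valid_fret_spec : Claim_equal_nearest_valid_fret := by
  intro s fret _
  unfold Spec_nearest_valid_fret
  rw [A_eq_core, B_eq_core]
  by_cases hE : s = "E"
  · subst hE
    rw [show resolveA "E" = [0, 1, 3, 5, 7, 8, 10, 12, 13, 15, 17, 19, 20, 22] from by decide,
        show resolveB "E" = [0, 1, 3, 5, 7, 8, 10, 12, 13, 15, 17, 19, 20, 22] from by decide]
    exact core_eq_of _ (by left; rfl) fret
  by_cases he : s = "e"
  · subst he
    rw [show resolveA "e" = [0, 1, 3, 5, 7, 8, 10, 12, 13, 15, 17, 19, 20, 22] from by decide,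
        show resolveB "e" = [0, 1, 3, 5, 7, 8, 10, 12, 13, 15, 17, 19, 20, 22] from by decide]
    exact core_eq_of _ (by left; rfl) fret
  by_cases hA : s = "A"
  · subst hA
    rw [show resolveA "A" = [0, 2, 3, 5, 7, 8, 10, 12, 14, 15, 17, 19, 20, 22] from by decide,
        show resolveB "A" = [0, 2, 3, 5, 7, 8, 10, 12, 14, 15, 17, 19, 20, 22] from by decide]
    exact core_eq_of _ (by right; left; rfl) fret
  by_cases hD : s = "D"
  · subst hD
    rw [show resolveA "D" = [0, 2, 3, 5, 7, 9, 10, 12, 14, 15, 17, 19, 21, 22] from by decide,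
        show resolveB "D" = [0, 2, 3, 5, 7, 9, 10, 12, 14, 15, 17, 19, 21, 22] from by decide]
    exact core_eq_of _ (by right; right; left; rfl) fret
  by_cases hG : s = "G"
  · subst hG
    rw [show resolveA "G" = [0, 2, 4, 5, 7, 9, 10, 12, 14, 16, 17, 19, 21, 22] from by decide,
        show resolveB "G" = [0, 2, 4, 5, 7, 9, 10, 12, 14, 16, 17, 19, 21, 22] from by decide]
    exact core_eq_of _ (by right; right; right; left; rfl) fret
  by_cases hB : s = "B"
  · subst hB
    rw [show resolveA "B" = [0, 1, 3, 5, 6, 8, 10, 12, 13, 15, 17, 18, 20, 22] from by decide,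
        show resolveB "B" = [0, 1, 3, 5, 6, 8, 10, 12, 13, 15, 17, 18, 20, 22] from by decide]
    exact core_eq_of _ (by right; right; right; right; rfl) fret
  · rw [resolveA_default s hE hA hD hG hB he, resolveB_default s hA hD hG hB]
    exact core_eq_of _ (by left; rfl) fret
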